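-- pv_equiv track=rewrite | github.com/Ujikintoki/simple_homework_agent | test/evaluate_boundary_dataset.py | is_platform_content_filter_error
-- ===== SOURCE A (Python) =====
-- def is_platform_content_filter_error(error_text: str) -> bool:
--     t = (error_text or "").lower()
--     if not t:
--         return False
--     hints = [
--         "response was filtered due to the prompt triggering azure openai's content management policy",
--         "content management policy",
--         "content filter",
--         "badrequesterror",
--         "error code: 400",
--         "'code': '400'",
--     ]
--     return any(h in t for h in hints)
-- ===== SOURCE B (Python) =====
-- _HINTS = [
--     "response was filtered due to the prompt triggering azure openai's content management policy",
--     "content management policy",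
--     "content filter",
--     "badrequesterror",
--     "error code: 400",
--     "'code': '400'",
-- ]
--
--
-- def _build_trie(hints):
--     # dict-of-dicts prefix trie; key "" marks a terminal node
--     root = {}
--     for h in hints:
--         node = root
--         for ch in h:
--             node = node.setdefault(ch, {})
--         node[""] = True
--     return root
--
--
-- _TRIE = _build_trie(_HINTS)
--
--
-- def is_platform_content_filter_error(error_text: str) -> bool:
--     # Walk the shared-prefix trie at each start position of the lowered text,
--     # instead of running six independent substring searches.
--     t = (error_text or "").lower()
--     for i in range(len(t)):
--         node = _TRIE
--         j = i
--         while True: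
--             if "" in node:
--                 return True
--             if j == len(t):
--                 break
--             node = node.get(t[j])
--             if node is None:
--                 break
--             j += 1
--     return False
-- ===== Notes on version B (the rewrite author's own statement) =====
-- stated objective: alternative
-- what changed: B builds a prefix trie of the six hints once and, at each start position of the lowered text, walks the trie character by character, so shared hint prefixes are matched by one traversal instead of six independent per-hint substring searches.
import Mathlib
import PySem

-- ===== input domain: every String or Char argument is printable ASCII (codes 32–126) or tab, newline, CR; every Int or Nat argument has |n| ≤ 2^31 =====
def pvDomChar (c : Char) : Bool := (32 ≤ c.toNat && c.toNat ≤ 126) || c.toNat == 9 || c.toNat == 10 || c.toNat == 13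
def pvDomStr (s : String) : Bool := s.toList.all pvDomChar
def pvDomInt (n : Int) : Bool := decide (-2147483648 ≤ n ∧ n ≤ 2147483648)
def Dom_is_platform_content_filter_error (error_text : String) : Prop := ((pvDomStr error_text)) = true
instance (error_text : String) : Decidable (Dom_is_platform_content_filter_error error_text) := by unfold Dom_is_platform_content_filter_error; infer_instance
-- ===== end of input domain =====

-- B replaces A's six independent substring searches by a prefix trie of the hints,
-- walked once at each start position of the lowered text (objective: alternative).

-- The shared hint list (pure data, identical in both Pythons).
def pvHints : List String :=
  [ "response was filtered due to the prompt triggering azure openai's content management policy"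
  , "content management policy"
  , "content filter"
  , "badrequesterror"
  , "error code: 400"
  , "'code': '400'" ]

-- ===== PORT A =====
-- t = (error_text or "").lower(); if not t: return False; return any(h in t for h in hints)
def is_platform_content_filter_error (error_text : String) : Bool :=
  let t := PySem.Str.lower error_text
  if t.toList = [] then false
  else pvHints.any (fun h => PySem.Str.isIn h t)

-- ===== PORT B =====
-- the dict-of-dicts trie of Source B, as a mutual inductive (node = terminal flag + edge list)
mutual
inductive PvTrie where
  | node : Bool → PvEdges → PvTrie
inductive PvEdges where
  | nil : PvEdges
  | cons : Char → PvTrie → PvEdges → PvEdges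
end

-- node.get(ch)
def pvFindE : PvEdges → Char → Option PvTrie
  | .nil, _ => none
  | .cons c' t es, c => if c' = c then some t else pvFindE es c

-- fresh chain of nodes for the remaining characters of a hint (setdefault on a missing key)
def pvPath : List Char → PvTrie
  | [] => .node true .nil
  | c :: cs => .node false (.cons c (pvPath cs) .nil)

-- inner 'for ch in h: node = node.setdefault(ch, {})' plus the terminal mark
mutual
def pvInsert : PvTrie → List Char → PvTrie
  | .node _ es, [] => .node true es
  | .node b es, c :: cs => .node b (pvInsertE es c cs)
termination_by _t cs => (cs.length, 0)
def pvInsertE : PvEdges → Char → List Char → PvEdges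
  | .nil, c, cs => .cons c (pvPath cs) .nil
  | .cons c' t es, c, cs =>
      if c' = c then .cons c' (pvInsert t cs) es else .cons c' t (pvInsertE es c cs)
termination_by es _ cs => (cs.length, 1 + sizeOf es)
end

-- _build_trie: fold the hints into an empty trie
def pvRoot : PvTrie := pvHints.foldl (fun t h => pvInsert t h.toList) (.node false .nil)

-- the inner 'while True' walk from one start position
def pvAccepts : PvTrie → List Char → Bool
  | .node b _, [] => b
  | .node b es, c :: cs =>
      b || (match pvFindE es c with
            | none => false
            | some t => pvAccepts t cs)

-- the outer 'for i in range(len(t))': walk the suffixes of t left to right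
def pvScanT : List Char → Bool
  | [] => false
  | c :: rest => pvAccepts pvRoot (c :: rest) || pvScanT rest

def is_platform_content_filter_error_alt (error_text : String) : Bool :=
  pvScanT (PySem.Chars.lower error_text.toList)

-- ===== PRECONDITION & SPEC =====
def Spec_is_platform_content_filter_error (error_text : String) (out : Bool) : Prop := out = is_platform_content_filter_error_alt error_text
instance (error_text : String) (out : Bool) : Decidable (Spec_is_platform_content_filter_error error_text out) := by unfold Spec_is_platform_content_filter_error; infer_instance

-- ===== CLAIM (what is proved, stated in full; the proofs are below) =====
def Claim_equal_is_platform_content_filter_error : Prop := ∀ (error_text : String), Dom_is_platform_content_filter_error error_text → Spec_is_platform_content_filter_error error_text (is_platform_content_filter_error error_text)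

-- ===== LEMMAS AND PROOFS =====

-- a fresh path accepts exactly the texts it is a prefix of
theorem pvAccepts_path (p cs : List Char) :
    pvAccepts (pvPath p) cs = decide (p <+: cs) := by
  induction p generalizing cs with
  | nil =>
      cases cs <;> simp [pvPath, pvAccepts]
  | cons a p' ih =>
      cases cs with
      | nil => simp [pvPath, pvAccepts]
      | cons c cs' =>
          by_cases hac : a = c
          · subst hac
            simp [pvPath, pvAccepts, pvFindE, ih]
          · simp [pvPath, pvAccepts, pvFindE, hac]

-- the empty trie accepts nothing
theorem pvAccepts_empty (cs : List Char) : pvAccepts (.node false .nil) cs = false := by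
  cases cs <;> simp [pvAccepts, pvFindE]

-- looking up a character after an edge insertion
-- structural induction on the edge list alone (PvEdges is one half of a mutual pair)
theorem pvEdgesInduct (motive : PvEdges → Prop) (h1 : motive .nil)
    (h2 : ∀ (c : Char) (t : PvTrie) (es : PvEdges), motive es → motive (.cons c t es)) :
    ∀ es, motive es
  | .nil => h1
  | .cons c t es => h2 c t es (pvEdgesInduct motive h1 h2 es)

theorem pvFindE_insertE (es : PvEdges) (c : Char) (p : List Char) (c' : Char) :
    pvFindE (pvInsertE es c p) c' =
      if c' = c then
        some (match pvFindE es c with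
              | none => pvPath p
              | some t => pvInsert t p)
      else pvFindE es c' := by
  induction es using pvEdgesInduct with
  | h1 =>
      by_cases h : c' = c
      · subst h; simp [pvInsertE, pvFindE]
      · simp [pvInsertE, pvFindE, h, Ne.symm h]
  | h2 a t es ih =>
      by_cases hac : a = c
      · subst hac
        by_cases h : c' = a
        · subst h; simp [pvInsertE, pvFindE]
        · simp [pvInsertE, pvFindE, h, Ne.symm h]
      · by_cases h : c' = a
        · subst h
          simp [pvInsertE, pvFindE, hac, ih, Ne.symm hac]
        · simp [pvInsertE, pvFindE, hac, ih, h, Ne.symm h]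

-- inserting a pattern adds exactly its prefixes-of-text acceptances
theorem pvAccepts_insert (p : List Char) (t : PvTrie) (cs : List Char) :
    pvAccepts (pvInsert t p) cs = (decide (p <+: cs) || pvAccepts t cs) := by
  induction p generalizing t cs with
  | nil =>
      obtain ⟨b, es⟩ := t
      cases cs <;> simp [pvInsert, pvAccepts]
  | cons a p' ih =>
      obtain ⟨b, es⟩ := t
      cases cs with
      | nil => simp [pvInsert, pvAccepts]
      | cons c cs' =>
          by_cases hca : c = a
          · subst hca
            cases hfe : pvFindE es c with
            | none =>
                simp [pvInsert, pvAccepts, pvFindE_insertE, hfe, pvAccepts_path,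
                  Bool.or_comm]
            | some t' =>
                simp [pvInsert, pvAccepts, pvFindE_insertE, hfe, ih,
                  Bool.or_comm, Bool.or_assoc]
          · have : ¬ (a :: p') <+: (c :: cs') := by
              intro h
              exact hca (List.cons_prefix_cons.mp h).1.symm
            cases hfe : pvFindE es c with
            | none => simp [pvInsert, pvAccepts, pvFindE_insertE, hca, hfe, this]
            | some t' => simp [pvInsert, pvAccepts, pvFindE_insertE, hca, hfe, this]

-- the folded trie accepts a text iff some hint is a prefix of it
theorem pvAccepts_foldl (hs : List String) (t : PvTrie) (cs : List Char) :
    pvAccepts (hs.foldl (fun t h => pvInsert t h.toList) t) cs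
      = (hs.any (fun h => decide (h.toList <+: cs)) || pvAccepts t cs) := by
  induction hs generalizing t with
  | nil => simp
  | cons h hs ih =>
      simp [List.foldl_cons, ih, pvAccepts_insert, Bool.or_comm, Bool.or_assoc]

theorem pvAccepts_root (cs : List Char) :
    pvAccepts pvRoot cs = pvHints.any (fun h => decide (h.toList <+: cs)) := by
  rw [pvRoot, pvAccepts_foldl, pvAccepts_empty, Bool.or_false]

-- 'sub in s' splits on a cons: either sub is a prefix here or it occurs in the tail.
theorem pvIsIn_cons (h : List Char) (c : Char) (rest : List Char) :
    PySem.Chars.isIn h (c :: rest)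
      = (decide (h <+: (c :: rest)) || PySem.Chars.isIn h rest) := by
  rw [Bool.eq_iff_iff]
  simp [PySem.Chars.isIn_iff_infix, List.infix_cons_iff]

-- every hint is nonempty, so no hint occurs in the empty text
theorem pvHints_no_hit_nil : pvHints.any (fun h => PySem.Chars.isIn h.toList []) = false := by
  have key : ∀ sub : List Char, PySem.Chars.isIn sub [] = decide (sub = []) := by
    intro sub; rw [Bool.eq_iff_iff]; simp [PySem.Chars.isIn_iff_infix]
  simp [pvHints, key]

-- the trie scan finds a hit iff some hint is a substring
theorem pvScanT_eq_any (cs : List Char) :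
    pvScanT cs = pvHints.any (fun h => PySem.Chars.isIn h.toList cs) := by
  induction cs with
  | nil => simp [pvScanT, pvHints_no_hit_nil]
  | cons c rest ih =>
      rw [Bool.eq_iff_iff]
      simp [pvScanT, pvAccepts_root, ih, pvIsIn_cons, List.any_eq_true]
      constructor
      · rintro (⟨h, hm, hw⟩ | ⟨h, hm, hw⟩)
        · exact ⟨h, hm, Or.inl hw⟩
        · exact ⟨h, hm, Or.inr hw⟩
      · rintro ⟨h, hm, hw | hw⟩
        · exact Or.inl ⟨h, hm, hw⟩
        · exact Or.inr ⟨h, hm, hw⟩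

-- ===== VERDICT (by name: the statement is the Claim_ definition above) =====
theorem is_platform_content_filter_error_spec : Claim_equal_is_platform_content_filter_error := by
  intro s _
  unfold Spec_is_platform_content_filter_error is_platform_content_filter_error
    is_platform_content_filter_error_alt
  rw [pvScanT_eq_any]
  by_cases hnil : (PySem.Str.lower s).toList = []
  · simp only [hnil, if_pos]
    have : PySem.Chars.lower s.toList = [] := by
      simpa [PySem.Str.lower] using hnil
    rw [this, pvHints_no_hit_nil]
  · simp only [hnil, if_neg, not_false_iff]
    have hl : PySem.Chars.lower s.toList = (PySem.Str.lower s).toList := by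
      simp [PySem.Str.lower]
    rw [hl]
    simp [PySem.Str.isIn]
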